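-- pv_equiv track=rewrite | github.com/rohitk2004/leetcode | streamlit_app.py | inject_number
-- ===== SOURCE A (Python) =====
-- def inject_number(text):
--     """Inserts the target number after every 6 words as requested."""
--     target = "1 (855) 783-7555"
--     words = text.split()
--     result = []
--     for i, word in enumerate(words):
--         result.append(word)
--         if (i + 1) % 6 == 0:
--             result.append(target)
--     return ' '.join(result)
-- ===== SOURCE B (Python) =====
-- def inject_number(text):
--     """Inserts the target number after every 6 words as requested."""
--     target = "1 (855) 783-7555"
--     words = text.split()
--     out = []
--     while words:
--         chunk, words = words[:6], words[6:]
--         out += chunk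
--         if len(chunk) == 6:
--             out.append(target)
--     return ' '.join(out)
-- ===== Notes on version B (the rewrite author's own statement) =====
-- stated objective: alternative
-- what changed: Replaces the per-word enumerate loop with a modulo test by a while loop that slices the word list into fixed 6-word chunks, appending the target after each full chunk.
import Mathlib
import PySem

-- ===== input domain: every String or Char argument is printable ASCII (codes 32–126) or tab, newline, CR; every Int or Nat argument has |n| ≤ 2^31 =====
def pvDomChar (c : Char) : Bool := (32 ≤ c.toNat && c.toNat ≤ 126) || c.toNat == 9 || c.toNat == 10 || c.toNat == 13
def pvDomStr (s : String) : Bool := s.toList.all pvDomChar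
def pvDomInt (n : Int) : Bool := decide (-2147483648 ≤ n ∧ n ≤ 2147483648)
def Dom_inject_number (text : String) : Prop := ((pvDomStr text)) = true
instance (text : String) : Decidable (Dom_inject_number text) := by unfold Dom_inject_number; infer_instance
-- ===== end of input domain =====

-- B re-implements A with a while loop over 6-word slices instead of an enumerate loop with a
-- modulo test; same cost, different decomposition (objective: alternative).

-- ===== PORT A =====
def inject_number (text : String) : String :=
  let target := "1 (855) 783-7555"
  let words := PySem.Str.split₀ text
  let result := (PySem.List.enumerate words 0).foldl
    (fun res (p : Int × String) =>
      let res := res ++ [p.2]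
      if PySem.Int.mod (p.1 + 1) 6 = 0 then res ++ [target] else res) ([] : List String)
  PySem.Str.join " " result

-- ===== PORT B =====
-- the 'while words:' loop of Source B: pop a 6-word slice, extend, append target on a full chunk
def injectLoopB (target : String) : List String → List String → List String
  | out, [] => out
  | out, w :: ws =>
    let chunk := PySem.List.slice (w :: ws) none (some 6)
    let rest := PySem.List.slice (w :: ws) (some 6) none
    let out := out ++ chunk
    let out := if chunk.length = 6 then out ++ [target] else out
    injectLoopB target out rest
termination_by _ ws => ws.length
decreasing_by simp [PySem.List.slice_from]

def inject_number_alt (text : String) : String :=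
  let target := "1 (855) 783-7555"
  let words := PySem.Str.split₀ text
  PySem.Str.join " " (injectLoopB target [] words)

-- ===== PRECONDITION & SPEC =====
def Spec_inject_number (text : String) (out : String) : Prop := out = inject_number_alt text
instance (text : String) (out : String) : Decidable (Spec_inject_number text out) := by unfold Spec_inject_number; infer_instance

-- ===== CLAIM (what is proved, stated in full; the proofs are below) =====
def Claim_equal_inject_number : Prop := ∀ (text : String), Dom_inject_number text → Spec_inject_number text (inject_number text)

-- ===== LEMMAS AND PROOFS =====

-- the list A's loop produces after the words (s, w), (s+1, ·), … — the common characterisation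
def aRes (target : String) : Int → List String → List String
  | _, [] => []
  | s, w :: ws =>
    (w :: (if PySem.Int.mod (s + 1) 6 = 0 then [target] else [])) ++ aRes target (s + 1) ws

lemma foldA_eq_aRes (target : String) : ∀ (ws : List String) (s : Int) (acc : List String),
    (PySem.List.enumerate ws s).foldl
      (fun res (p : Int × String) =>
        let res := res ++ [p.2]
        if PySem.Int.mod (p.1 + 1) 6 = 0 then res ++ [target] else res) acc
      = acc ++ aRes target s ws := by
  intro ws
  induction ws with
  | nil => intro s acc; simp [aRes, PySem.List.enumerate_nil]
  | cons w ws ih =>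
    intro s acc
    rw [PySem.List.enumerate_cons]
    simp only [List.foldl_cons, ih, aRes]
    split_ifs <;> simp

lemma aRes_mod_congr (target : String) : ∀ (ws : List String) (s s' : Int),
    PySem.Int.mod s 6 = PySem.Int.mod s' 6 → aRes target s ws = aRes target s' ws := by
  intro ws
  induction ws with
  | nil => intros; rfl
  | cons w ws ih =>
    intro s s' h
    rw [PySem.Int.mod_eq_emod_of_pos (by omega)] at h
    rw [PySem.Int.mod_eq_emod_of_pos (by omega)] at h
    simp only [aRes]
    have h1 : PySem.Int.mod (s + 1) 6 = PySem.Int.mod (s' + 1) 6 := by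
      rw [PySem.Int.mod_eq_emod_of_pos (by omega), PySem.Int.mod_eq_emod_of_pos (by omega)]
      omega
    rw [h1, ih (s + 1) (s' + 1) h1]

lemma injectLoopB_eq_aRes (target : String) : ∀ (n : Nat) (ws out : List String),
    ws.length ≤ n → injectLoopB target out ws = out ++ aRes target 0 ws := by
  intro n
  induction n with
  | zero =>
    intro ws out h
    have : ws = [] := by cases ws <;> simp_all
    subst this; simp [injectLoopB, show aRes target 0 [] = [] from rfl]
  | succ n ih =>
    intro ws out h
    match ws with
    | [] => simp [injectLoopB, show aRes target 0 [] = [] from rfl]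
    | [a] =>
      rw [injectLoopB]
      simp only [Nat.ofNat_nonneg, PySem.List.slice_to, PySem.List.slice_from, Int.reduceToNat]
      simp [injectLoopB, aRes, PySem.Int.mod, (by decide : Int.fmod 1 6 = 1)]
    | [a,b] =>
      rw [injectLoopB]
      simp only [Nat.ofNat_nonneg, PySem.List.slice_to, PySem.List.slice_from, Int.reduceToNat]
      simp [injectLoopB, aRes, PySem.Int.mod, (by decide : Int.fmod 1 6 = 1),
        (by decide : Int.fmod 2 6 = 2)]
    | [a,b,c] =>
      rw [injectLoopB]
      simp only [Nat.ofNat_nonneg, PySem.List.slice_to, PySem.List.slice_from, Int.reduceToNat]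
      simp [injectLoopB, aRes, PySem.Int.mod, (by decide : Int.fmod 1 6 = 1),
        (by decide : Int.fmod 2 6 = 2),
        (by decide : Int.fmod 3 6 = 3)]
    | [a,b,c,d] =>
      rw [injectLoopB]
      simp only [Nat.ofNat_nonneg, PySem.List.slice_to, PySem.List.slice_from, Int.reduceToNat]
      simp [injectLoopB, aRes, PySem.Int.mod, (by decide : Int.fmod 1 6 = 1),
        (by decide : Int.fmod 2 6 = 2),
        (by decide : Int.fmod 3 6 = 3),
        (by decide : Int.fmod 4 6 = 4)]
    | [a,b,c,d,e] =>
      rw [injectLoopB]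
      simp only [Nat.ofNat_nonneg, PySem.List.slice_to, PySem.List.slice_from, Int.reduceToNat]
      simp [injectLoopB, aRes, PySem.Int.mod, (by decide : Int.fmod 1 6 = 1),
        (by decide : Int.fmod 2 6 = 2),
        (by decide : Int.fmod 3 6 = 3),
        (by decide : Int.fmod 4 6 = 4),
        (by decide : Int.fmod 5 6 = 5)]
    | a :: b :: c :: d :: e :: f :: rest =>
      rw [injectLoopB]
      simp only [Nat.ofNat_nonneg, PySem.List.slice_to, PySem.List.slice_from, Int.reduceToNat,
        List.take_succ_cons, List.drop_succ_cons, List.take_zero, List.drop_zero]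
      rw [ih rest _ (by simp at h ⊢; omega)]
      have hmod : aRes target 6 rest = aRes target 0 rest :=
        aRes_mod_congr target rest 6 0 (by decide)
      simp [aRes, PySem.Int.mod, hmod, (by decide : Int.fmod 1 6 = 1),
        (by decide : Int.fmod 2 6 = 2), (by decide : Int.fmod 3 6 = 3),
        (by decide : Int.fmod 4 6 = 4), (by decide : Int.fmod 5 6 = 5)]

-- ===== VERDICT (by name: the statement is the Claim_ definition above) =====
theorem inject_number_spec : Claim_equal_inject_number := by
  intro text _
  show PySem.Str.join " "
      ((PySem.List.enumerate (PySem.Str.split₀ text) 0).foldl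
        (fun res (p : Int × String) =>
          let res := res ++ [p.2]
          if PySem.Int.mod (p.1 + 1) 6 = 0 then res ++ ["1 (855) 783-7555"] else res) [])
      = PySem.Str.join " " (injectLoopB "1 (855) 783-7555" [] (PySem.Str.split₀ text))
  rw [foldA_eq_aRes,
    injectLoopB_eq_aRes "1 (855) 783-7555" (PySem.Str.split₀ text).length _ _ le_rfl]
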